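-- pv_equiv track=rewrite | github.com/Eiriksen/Advent-of-code | AOC 2024/Day 4 - Spinning tables.py | rotate_table_315
-- ===== SOURCE A (Python) =====
-- def prep_list(length):
--    return([ [] for i in range(length)])
--
-- def reverse(string):
--     return(string[::-1])
--
-- def rotate_table_315(table):
--     n_cols = len(table[0])
--     n_rows = len(table)
--     table_rotated = prep_list(n_cols + n_rows)
--     # iterate
--     for i_row in range(0,len(table)):
--         # Backwards!:
--         for i_col in range(len(table[i_row])-1, -1, -1):
--             cur_newrow = i_row + i_col
--             table_rotated[cur_newrow].append(table[i_row][i_col])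
--     # everything is reversed this time, so reverse again
--     for i_row in range(0,len(table_rotated)):
--         table_rotated[i_row] = reverse(table_rotated[i_row])
--     # output
--     return(table_rotated)
-- ===== SOURCE B (Python) =====
-- def rotate_table_315(table):
--     n_cols = len(table[0])
--     n_rows = len(table)
--     return [[table[d - c][c]
--              for c in range(d + 1)
--              if d - c < n_rows and c < len(table[d - c])]
--             for d in range(n_cols + n_rows)]
-- ===== Notes on version B (the rewrite author's own statement) =====
-- stated objective: simpler
-- what changed: B builds each anti-diagonal directly by gathering table[d-c][c] for increasing c in one comprehension, instead of A's scatter of every cell into buckets in reverse order followed by a second reverse-each-bucket pass.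
import Mathlib
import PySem

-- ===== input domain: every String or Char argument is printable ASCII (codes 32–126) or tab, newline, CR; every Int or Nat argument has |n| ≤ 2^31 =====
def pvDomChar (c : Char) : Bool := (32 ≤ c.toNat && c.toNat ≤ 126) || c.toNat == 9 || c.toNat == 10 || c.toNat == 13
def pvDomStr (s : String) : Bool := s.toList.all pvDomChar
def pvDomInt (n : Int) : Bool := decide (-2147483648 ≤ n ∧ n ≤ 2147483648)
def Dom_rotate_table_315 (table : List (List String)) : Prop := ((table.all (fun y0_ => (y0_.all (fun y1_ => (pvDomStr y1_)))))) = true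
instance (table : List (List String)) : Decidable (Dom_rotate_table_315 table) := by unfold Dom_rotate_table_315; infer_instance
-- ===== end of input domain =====

-- B replaces A's reverse-order scatter into buckets plus a second reverse-each-bucket pass
-- by a direct gather of each anti-diagonal in final order (objective: simpler).

-- ===== PORT A =====
-- helper prep_list
def prepList (length : Nat) : List (List String) :=
  (List.range length).map (fun _ => ([] : List String))

-- helper reverse (Python slice [::-1], here applied to a list)
def pyReverse (l : List String) : List String := l.reverse

-- body of the inner `for i_col in range(len(table[i_row])-1, -1, -1)` loop:
-- table_rotated[cur_newrow].append(table[i_row][i_col]); indices are in range on Pre_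
-- (Python raises IndexError outside Pre_, excluded).
def innerStep (table : List (List String)) (i_row : Nat) (acc2 : List (List String)) (i_col : Nat) : List (List String) :=
  acc2.set (i_row + i_col) ((acc2.getD (i_row + i_col) []) ++ [(table.getD i_row []).getD i_col ""])

-- one iteration of the outer `for i_row in range(0,len(table))` loop
def rowStep (table : List (List String)) (acc : List (List String)) (i_row : Nat) : List (List String) :=
  ((List.range (table.getD i_row []).length).reverse).foldl (innerStep table i_row) acc

def rotate_table_315 (table : List (List String)) : List (List String) :=
  let n_cols := (table.getD 0 []).length   -- len(table[0]); Python raises on empty table, excluded by Pre_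
  let n_rows := table.length
  let table_rotated := prepList (n_cols + n_rows)
  let rotated := (List.range table.length).foldl (rowStep table) table_rotated
  -- for i_row in range(0,len(table_rotated)): table_rotated[i_row] = reverse(table_rotated[i_row])
  (List.range rotated.length).foldl (fun acc i_row => acc.set i_row (pyReverse (acc.getD i_row []))) rotated

-- ===== PORT B =====
-- the inner list comprehension: one diagonal, gathered in final order
def diagB (table : List (List String)) (n_rows d : Nat) : List String :=
  (List.range (d + 1)).filterMap (fun c =>
    if d - c < n_rows ∧ c < (table.getD (d - c) []).length then
      some ((table.getD (d - c) []).getD c "")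
    else none)

def rotate_table_315_alt (table : List (List String)) : List (List String) :=
  let n_cols := (table.getD 0 []).length
  let n_rows := table.length
  (List.range (n_cols + n_rows)).map (fun d => diagB table n_rows d)

-- ===== PRECONDITION & SPEC =====
-- Pre_ excludes exactly the inputs where Python A raises IndexError: the empty table
-- (evaluating table[0]; Python B raises there too) and ragged tables where some cell's
-- diagonal index i_row+i_col reaches past the n_cols+n_rows buckets.
def Pre_rotate_table_315 (table : List (List String)) : Prop :=
  table ≠ [] ∧ ∀ i, i < table.length →
    i + (table.getD i []).length ≤ table.length + (table.getD 0 []).length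
instance (table : List (List String)) : Decidable (Pre_rotate_table_315 table) := by
  unfold Pre_rotate_table_315; infer_instance

def pvWitness_rotate_table_315 : List (List String) := [["a", "b"], ["c", "d"]]

def Spec_rotate_table_315 (table : List (List String)) (out : List (List String)) : Prop := out = rotate_table_315_alt table
instance (table : List (List String)) (out : List (List String)) : Decidable (Spec_rotate_table_315 table out) := by unfold Spec_rotate_table_315; infer_instance

-- ===== CLAIM (what is proved, stated in full; the proofs are below) =====
def Claim_equal_rotate_table_315 : Prop := ∀ (table : List (List String)), Dom_rotate_table_315 table → Pre_rotate_table_315 table → Spec_rotate_table_315 table (rotate_table_315 table)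

-- ===== LEMMAS AND PROOFS =====

-- the cell row i contributes to bucket d (as A's scatter produces it, row by row)
def gfun (table : List (List String)) (d i : Nat) : Option String :=
  if i ≤ d ∧ d < i + (table.getD i []).length then
    some ((table.getD i []).getD (d - i) "")
  else none

theorem fm_congr {α β : Type} (f g : α → Option β) (l : List α)
    (h : ∀ x ∈ l, f x = g x) : l.filterMap f = l.filterMap g := by
  induction l with
  | nil => rfl
  | cons a t ih =>
    simp only [List.filterMap_cons, h a (List.mem_cons_self ..)]
    rw [ih (fun x hx => h x (List.mem_cons_of_mem _ hx))]

theorem fm_rev {α β : Type} (f : α → Option β) (l : List α) :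
    l.reverse.filterMap f = (l.filterMap f).reverse := by
  induction l with
  | nil => rfl
  | cons a t ih =>
    simp [List.filterMap_append, List.filterMap_cons, ih]
    cases f a <;> simp

theorem range_split (a b : Nat) :
    List.range (a + b) = List.range a ++ (List.range b).map (a + ·) := by
  induction b with
  | zero => simp
  | succ b ih =>
    rw [show a + (b+1) = (a+b) + 1 from rfl, List.range_succ, ih, List.range_succ]
    simp [List.append_assoc]

theorem inner_spec (table : List (List String)) (i : Nat) :
    ∀ (j : Nat) (acc : List (List String)), i + j ≤ acc.length →
      ((List.range j).reverse.foldl (innerStep table i) acc).length = acc.length ∧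
      ∀ d, ((List.range j).reverse.foldl (innerStep table i) acc)[d]? =
        (acc[d]?).map (fun b => b ++
          (if i ≤ d ∧ d < i + j then [(table.getD i []).getD (d - i) ""] else [])) := by
  intro j
  induction j with
  | zero =>
    intro acc _
    refine ⟨rfl, fun d => ?_⟩
    simp only [List.range_zero, List.reverse_nil, List.foldl_nil]
    rw [if_neg (by omega)]
    cases acc[d]? <;> simp
  | succ j ih =>
    intro acc hle
    have hrange : (List.range (j+1)).reverse = j :: (List.range j).reverse := by
      rw [List.range_succ]; simp
    rw [hrange, List.foldl_cons]
    have hij : i + j < acc.length := by omega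
    have hlen' : (innerStep table i acc j).length = acc.length := by
      simp [innerStep]
    obtain ⟨hl, hv⟩ := ih (innerStep table i acc j) (by omega)
    refine ⟨by rw [hl, hlen'], fun d => ?_⟩
    rw [hv d]
    have hset : (innerStep table i acc j)[d]? =
        if i + j = d then some ((acc.getD (i+j) []) ++ [(table.getD i []).getD j ""])
        else acc[d]? := by
      simp only [innerStep, List.getElem?_set]
      split_ifs with h1 <;> simp_all
    rw [hset]
    by_cases hd : i + j = d
    · rw [if_pos hd]
      have hvd : acc[d]? = some (acc.getD (i+j) []) := by
        rw [List.getD_eq_getElem?_getD, ← hd, List.getElem?_eq_getElem hij]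
        rfl
      rw [hvd]
      simp only [Option.map_some]
      rw [if_neg (by omega), if_pos (by omega)]
      have : d - i = j := by omega
      rw [this]
      simp
    · rw [if_neg hd]
      have h2 : (i ≤ d ∧ d < i + j) ↔ (i ≤ d ∧ d < i + (j+1)) := by omega
      simp only [h2]

theorem scatter_spec (table : List (List String)) (L : Nat)
    (H : ∀ i, i < table.length → i + (table.getD i []).length ≤ L) :
    ∀ k, k ≤ table.length →
      (((List.range k).foldl (rowStep table) (prepList L)).length = L ∧
       ∀ d, ((List.range k).foldl (rowStep table) (prepList L))[d]? =
         if d < L then some ((List.range k).filterMap (gfun table d)) else none) := by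
  intro k
  induction k with
  | zero =>
    intro _
    refine ⟨by simp [prepList], fun d => ?_⟩
    simp only [List.range_zero, List.foldl_nil, List.filterMap_nil, prepList,
      List.getElem?_map]
    split_ifs <;> simp_all
  | succ k ih =>
    intro hk
    obtain ⟨hl, hv⟩ := ih (by omega)
    rw [List.range_succ, List.foldl_append, List.foldl_cons, List.foldl_nil]
    have hlen : k + (table.getD k []).length ≤
        ((List.range k).foldl (rowStep table) (prepList L)).length := by
      rw [hl]; exact H k (by omega)
    obtain ⟨hl2, hv2⟩ := inner_spec table k (table.getD k []).length _ hlen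
    refine ⟨by simp only [rowStep]; rw [hl2, hl], fun d => ?_⟩
    simp only [rowStep]
    rw [hv2 d, hv d]
    by_cases hd : d < L
    · rw [if_pos hd, if_pos hd]
      simp only [Option.map_some]
      rw [List.filterMap_append]
      congr 1
      simp only [List.filterMap_cons, List.filterMap_nil, gfun]
      split_ifs <;> simp
    · rw [if_neg hd, if_neg hd]; rfl

theorem rev_spec : ∀ (k : Nat) (acc : List (List String)),
    ((List.range k).foldl (fun a i => a.set i (pyReverse (a.getD i []))) acc).length = acc.length ∧
    ∀ d, ((List.range k).foldl (fun a i => a.set i (pyReverse (a.getD i []))) acc)[d]? =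
      if d < k then (acc[d]?).map List.reverse else acc[d]? := by
  intro k
  induction k with
  | zero =>
    intro acc
    refine ⟨rfl, fun d => ?_⟩
    simp only [List.range_zero, List.foldl_nil]
    rw [if_neg (by omega)]
  | succ k ih =>
    intro acc
    obtain ⟨hl, hv⟩ := ih acc
    rw [List.range_succ, List.foldl_append, List.foldl_cons, List.foldl_nil]
    refine ⟨by rw [List.length_set, hl], fun d => ?_⟩
    rw [List.getElem?_set]
    by_cases hd : k = d
    · subst hd
      rw [if_pos rfl, hl, if_pos (Nat.lt_succ_self k)]
      by_cases hin : k < acc.length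
      · rw [if_pos hin]
        have hk : ((List.range k).foldl (fun a i => a.set i (pyReverse (a.getD i []))) acc).getD k []
            = acc.getD k [] := by
          rw [List.getD_eq_getElem?_getD, List.getD_eq_getElem?_getD, hv k,
            if_neg (lt_irrefl k)]
        rw [hk, List.getD_eq_getElem?_getD, List.getElem?_eq_getElem hin]
        simp [pyReverse]
      · rw [if_neg hin, List.getElem?_eq_none (by omega)]
        rfl
    · rw [if_neg hd, hv d]
      have h2 : (d < k + 1) ↔ (d < k) := by omega
      simp only [h2]

theorem map_sub_range (d : Nat) :
    (List.range (d+1)).map (fun i => d - i) = (List.range (d+1)).reverse := by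
  apply List.ext_getElem
  · simp
  · intro k h1 h2
    simp only [List.getElem_map, List.getElem_range, List.getElem_reverse, List.length_range]
    omega

theorem diag_eq (table : List (List String)) (d : Nat) :
    ((List.range table.length).filterMap (gfun table d)).reverse
      = diagB table table.length d := by
  have hrange : List.range (d+1) = ((List.range (d+1)).reverse).map (fun i => d - i) := by
    rw [← map_sub_range]
    apply List.ext_getElem
    · simp
    · intro k h1 h2
      simp only [List.length_range] at h1
      simp only [List.getElem_map, List.getElem_range]
      omega
  have key : (List.range table.length).filterMap (gfun table d) =
      (List.range (d+1)).filterMap (fun i =>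
        (fun c => if d - c < table.length ∧ c < (table.getD (d - c) []).length then
          some ((table.getD (d - c) []).getD c "") else none) (d - i)) := by
    rcases Nat.le_total table.length (d+1) with hle | hle
    · rw [show d + 1 = table.length + (d + 1 - table.length) by omega, range_split,
        List.filterMap_append, List.filterMap_map]
      have h2 : (List.range (d + 1 - table.length)).filterMap
          ((fun i => (fun c => if d - c < table.length ∧ c < (table.getD (d - c) []).length then
            some ((table.getD (d - c) []).getD c "") else none) (d - i)) ∘ (table.length + ·)) = [] := by
        rw [List.filterMap_eq_nil_iff]
        intro a ha
        rw [List.mem_range] at ha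
        simp only [Function.comp]
        rw [if_neg (by omega)]
      rw [h2, List.append_nil]
      apply fm_congr
      intro i hi
      rw [List.mem_range] at hi
      have hdi : d - (d - i) = i := by omega
      simp only [gfun, hdi]
      split_ifs with h1 h3 h3 <;> first | rfl | omega
    · rw [show table.length = (d + 1) + (table.length - (d + 1)) by omega, range_split,
        List.filterMap_append]
      have h2 : ((List.range (table.length - (d+1))).map ((d+1) + ·)).filterMap (gfun table d) = [] := by
        rw [List.filterMap_map, List.filterMap_eq_nil_iff]
        intro a ha
        rw [List.mem_range] at ha
        simp only [Function.comp, gfun]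
        rw [if_neg (by omega)]
      rw [h2, List.append_nil]
      apply fm_congr
      intro i hi
      rw [List.mem_range] at hi
      have hdi : d - (d - i) = i := by omega
      simp only [gfun, hdi]
      split_ifs with h1 h3 h3 <;> first | rfl | omega
  rw [diagB, hrange, List.filterMap_map, fm_rev]
  congr 1

-- ===== VERDICT (by name: the statement is the Claim_ definition above) =====
theorem rotate_table_315_spec : Claim_equal_rotate_table_315 := by
  intro table _ hpre
  obtain ⟨-, H⟩ := hpre
  unfold Spec_rotate_table_315
  have H' : ∀ i, i < table.length →
      i + (table.getD i []).length ≤ (table.getD 0 []).length + table.length := by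
    intro i hi; have := H i hi; omega
  obtain ⟨hslen, hsv⟩ := scatter_spec table ((table.getD 0 []).length + table.length) H'
      table.length le_rfl
  show (let n_cols := (table.getD 0 []).length
        let n_rows := table.length
        let table_rotated := prepList (n_cols + n_rows)
        let rotated := (List.range table.length).foldl (rowStep table) table_rotated
        (List.range rotated.length).foldl
          (fun acc i_row => acc.set i_row (pyReverse (acc.getD i_row []))) rotated)
      = rotate_table_315_alt table
  simp only []
  set L := (table.getD 0 []).length + table.length with hL
  set S := (List.range table.length).foldl (rowStep table) (prepList L) with hS
  obtain ⟨hrlen, hrv⟩ := rev_spec S.length S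
  apply List.ext_getElem?
  intro d
  rw [hrv d, hslen]
  have halt : (rotate_table_315_alt table)[d]? =
      if d < L then some (diagB table table.length d) else none := by
    simp only [rotate_table_315_alt, List.getElem?_map, ← hL]
    split_ifs <;> simp_all
  rw [halt]
  by_cases hd : d < L
  · rw [if_pos hd, hsv d, if_pos hd]
    simp only [Option.map_some]
    rw [diag_eq, if_pos hd]
  · rw [if_neg hd, if_neg hd, hsv d, if_neg hd]
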